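-- pv_equiv track=rewrite | github.com/saxo-datagov/datahub | .github/scripts/utils/security_scan_utils.py | issue_pairs_cve_or_pkg
-- ===== SOURCE A (Python) =====
-- def undirected_pair_key(a: str, b: str) -> tuple[str, str]:
--     return (a, b) if a < b else (b, a)
--
-- def issue_pairs_cve_or_pkg(created: list[tuple[str, str, str]]) -> set[tuple[str, str]]:
--     n = len(created)
--     if n < 2:
--         return set()
--     parent = list(range(n))
--
--     def find(x: int) -> int:
--         while parent[x] != x:
--             parent[x] = parent[parent[x]]
--             x = parent[x]
--         return x
--
--     def union(x: int, y: int) -> None: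
--         rx, ry = find(x), find(y)
--         if rx != ry:
--             parent[rx] = ry
--
--     for i in range(n):
--         _, vid_i, pkg_i = created[i]
--         for j in range(i + 1, n):
--             _, vid_j, pkg_j = created[j]
--             if vid_i == vid_j or (bool(pkg_i) and bool(pkg_j) and pkg_i == pkg_j):
--                 union(i, j)
--     from collections import defaultdict
--
--     comp: dict[int, list[str]] = defaultdict(list)
--     for i in range(n):
--         comp[find(i)].append(created[i][0])
--     out: set[tuple[str, str]] = set()
--     for members in comp.values():
--         mlen = len(members)
--         if mlen < 2:
--             continue
--         for i in range(mlen):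
--             for j in range(i + 1, mlen):
--                 a, b = members[i], members[j]
--                 out.add(undirected_pair_key(a, b))
--     return out
-- ===== SOURCE B (Python) =====
-- # Faster exact re-implementation: bucket indices by vid and by non-empty pkg,
-- # union-find (by size) over consecutive indices of each bucket -- no O(n^2) pair scan.
-- def undirected_pair_key(a: str, b: str) -> tuple[str, str]:
--     return (a, b) if a < b else (b, a)
--
-- def issue_pairs_cve_or_pkg(created: list[tuple[str, str, str]]) -> set[tuple[str, str]]:
--     n = len(created)
--     if n < 2:
--         return set()
--     parent = list(range(n))
--     size = [1] * n
--
--     def find(x: int) -> int: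
--         while parent[x] != x:
--             x = parent[x]
--         return x
--
--     vid_buckets: dict[str, list[int]] = {}
--     pkg_buckets: dict[str, list[int]] = {}
--     for i, (_, vid, pkg) in enumerate(created):
--         vid_buckets.setdefault(vid, []).append(i)
--         if pkg:
--             pkg_buckets.setdefault(pkg, []).append(i)
--     for buckets in (vid_buckets, pkg_buckets):
--         for idxs in buckets.values():
--             for a, b in zip(idxs, idxs[1:]):
--                 ra, rb = find(a), find(b)
--                 if ra != rb:
--                     if size[ra] < size[rb]:
--                         ra, rb = rb, ra
--                     parent[rb] = ra
--                     size[ra] += size[rb]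
--     comp: dict[int, list[str]] = {}
--     for i in range(n):
--         comp.setdefault(find(i), []).append(created[i][0])
--     return {
--         undirected_pair_key(members[k], b)
--         for members in comp.values()
--         for k in range(len(members))
--         for b in members[k + 1:]
--     }
-- ===== Notes on version B (the rewrite author's own statement) =====
-- stated objective: faster
-- what changed: Instead of scanning all O(n^2) index pairs to find related issues, B buckets indices by vid and by non-empty pkg in dicts built in one pass and unions only consecutive indices of each bucket with a union-by-size/plain-find union-find (A unions over all related pairs with a path-halving find); the component grouping and pair emission keep the same meaning.
import Mathlib
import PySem

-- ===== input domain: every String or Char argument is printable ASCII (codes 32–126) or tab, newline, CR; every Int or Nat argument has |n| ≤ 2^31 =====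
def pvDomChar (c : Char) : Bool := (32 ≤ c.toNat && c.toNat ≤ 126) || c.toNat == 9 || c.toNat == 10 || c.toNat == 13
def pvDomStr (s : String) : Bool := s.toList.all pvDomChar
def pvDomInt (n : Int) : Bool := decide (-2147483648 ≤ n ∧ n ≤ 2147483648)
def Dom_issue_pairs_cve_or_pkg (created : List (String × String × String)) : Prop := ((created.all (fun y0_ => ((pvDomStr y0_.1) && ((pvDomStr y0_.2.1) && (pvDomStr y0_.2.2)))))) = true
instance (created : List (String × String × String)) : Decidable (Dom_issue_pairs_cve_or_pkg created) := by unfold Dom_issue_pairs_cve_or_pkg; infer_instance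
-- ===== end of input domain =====

-- B buckets indices by vid / non-empty pkg and unions only consecutive bucket members
-- (union by size, plain find) instead of A's O(n^2) scan over all index pairs.

-- ===== PORT A =====

def undirected_pair_key (a b : String) : String × String := if a < b then (a, b) else (b, a)

-- created[i] (indices are always in range where the ports use this)
def pvItem (created : List (String × String × String)) (i : Nat) : String × String × String :=
  created.getD i ("", "", "")

-- the pairing condition of A's double loop: vid_i == vid_j or (pkg_i and pkg_j and pkg_i == pkg_j)
def pvRel (created : List (String × String × String)) (i j : Nat) : Bool :=
  ((pvItem created i).2.1 == (pvItem created j).2.1) ||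
    (!((pvItem created i).2.2 == "") && !((pvItem created j).2.2 == "") &&
      ((pvItem created i).2.2 == (pvItem created j).2.2))

-- A's find: `while parent[x] != x: parent[x] = parent[parent[x]]; x = parent[x]`
-- (path halving; ported with fuel = len(parent), enough for any acyclic parent forest)
def pvFindLoopA : Nat → List Nat → Nat → List Nat × Nat
  | 0, p, x => (p, x)
  | f + 1, p, x =>
    if p.getD x x = x then (p, x)
    else
      let z := p.getD (p.getD x x) (p.getD x x)
      pvFindLoopA f (p.set x z) z

def pvFindA (p : List Nat) (x : Nat) : List Nat × Nat := pvFindLoopA p.length p x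

-- A's union: rx, ry = find(x), find(y); if rx != ry: parent[rx] = ry
def pvUnionA (p : List Nat) (x y : Nat) : List Nat :=
  let pr1 := pvFindA p x
  let pr2 := pvFindA pr1.1 y
  if pr1.2 ≠ pr2.2 then pr2.1.set pr1.2 pr2.2 else pr2.1

def issue_pairs_cve_or_pkg (created : List (String × String × String)) : List (String × String) :=
  let n := created.length
  if n < 2 then []
  else
    -- for i in range(n): for j in range(i+1, n): if related: union(i, j)
    let p1 := (List.range n).foldl (fun p i =>
        (List.range' (i + 1) (n - (i + 1))).foldl (fun p j =>
          if pvRel created i j then pvUnionA p i j else p) p) (List.range n)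
    -- comp[find(i)].append(created[i][0])  (find mutates parent: state is (parent, comp))
    let st := (List.range n).foldl
        (fun (st : List Nat × PySem.Dict Nat (List String)) i =>
          let pr := pvFindA st.1 i
          (pr.1, st.2.modify pr.2 [] (· ++ [(pvItem created i).1])))
        (p1, PySem.Dict.empty)
    -- out.add(undirected_pair_key(members[i], members[j])) over all i < j, per component
    st.2.values.foldl (fun out ms =>
      if ms.length < 2 then out
      else (List.range ms.length).foldl (fun out i =>
        (List.range' (i + 1) (ms.length - (i + 1))).foldl (fun out j =>
          PySem.Set.add out (undirected_pair_key (ms.getD i "") (ms.getD j ""))) out) out) []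

-- ===== PORT B =====

-- B's find: `while parent[x] != x: x = parent[x]` (no mutation; fuel = len(parent))
def pvFindB : Nat → List Nat → Nat → Nat
  | 0, _, x => x
  | f + 1, p, x => if p.getD x x = x then x else pvFindB f p (p.getD x x)

-- B's union by size over state (parent, size)
def pvUnionStepB (st : List Nat × List Nat) (e : Nat × Nat) : List Nat × List Nat :=
  let ra := pvFindB st.1.length st.1 e.1
  let rb := pvFindB st.1.length st.1 e.2
  if ra = rb then st
  else
    let ra' := if st.2.getD ra 0 < st.2.getD rb 0 then rb else ra
    let rb' := if st.2.getD ra 0 < st.2.getD rb 0 then ra else rb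
    (st.1.set rb' ra', st.2.set ra' (st.2.getD ra' 0 + st.2.getD rb' 0))

def issue_pairs_cve_or_pkg_alt (created : List (String × String × String)) : List (String × String) :=
  let n := created.length
  if n < 2 then []
  else
    -- vid_buckets.setdefault(vid, []).append(i);  if pkg: pkg_buckets.setdefault(pkg, []).append(i)
    let vb := (List.range n).foldl
        (fun (d : PySem.Dict String (List Nat)) i => d.modify (pvItem created i).2.1 [] (· ++ [i]))
        PySem.Dict.empty
    let pb := (List.range n).foldl
        (fun (d : PySem.Dict String (List Nat)) i =>
          if !((pvItem created i).2.2 == "") then d.modify (pvItem created i).2.2 [] (· ++ [i]) else d)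
        PySem.Dict.empty
    -- for buckets in (vid_buckets, pkg_buckets): for idxs in buckets.values(): for a, b in zip(idxs, idxs[1:]): union
    let st := (vb.values ++ pb.values).foldl
        (fun st idxs => (idxs.zip idxs.tail).foldl pvUnionStepB st)
        (List.range n, List.replicate n 1)
    -- comp.setdefault(find(i), []).append(created[i][0])
    let comp := (List.range n).foldl
        (fun (d : PySem.Dict Nat (List String)) i =>
          d.modify (pvFindB st.1.length st.1 i) [] (· ++ [(pvItem created i).1]))
        PySem.Dict.empty
    -- {key(members[k], b) for members in comp.values() for k in range(len(members)) for b in members[k+1:]}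
    -- (members[k+1:] with k+1 ≥ 0 is exactly List.drop (k+1))
    PySem.Set.ofList (comp.values.flatMap (fun ms =>
      (List.range ms.length).flatMap (fun k =>
        (ms.drop (k + 1)).map (fun b => undirected_pair_key (ms.getD k "") b))))

-- ===== PRECONDITION & SPEC =====
def Spec_issue_pairs_cve_or_pkg (created : List (String × String × String)) (out : List (String × String)) : Prop := out = issue_pairs_cve_or_pkg_alt created
instance (created : List (String × String × String)) (out : List (String × String)) : Decidable (Spec_issue_pairs_cve_or_pkg created out) := by unfold Spec_issue_pairs_cve_or_pkg; infer_instance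

-- ===== CLAIM (what is proved, stated in full; the proofs are below) =====
def Claim_equal_issue_pairs_cve_or_pkg : Prop := ∀ (created : List (String × String × String)), Dom_issue_pairs_cve_or_pkg created → Spec_issue_pairs_cve_or_pkg created (issue_pairs_cve_or_pkg created)

-- ===== LEMMAS AND PROOFS =====

-- ---------- union-find semantics: parent step, iterated parent, roots ----------

def pvFp (p : List Nat) (x : Nat) : Nat := p.getD x x

def pvReach (p : List Nat) : Nat → Nat → Nat
  | 0, x => x
  | k + 1, x => pvReach p k (pvFp p x)

def pvIsRoot (p : List Nat) (x : Nat) : Prop := pvFp p x = x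

def pvRootR (p : List Nat) (x r : Nat) : Prop := ∃ k, pvReach p k x = r ∧ pvIsRoot p r

def pvInv (p : List Nat) : Prop :=
  ∀ x, x < p.length → pvFp p x < p.length ∧ ∃ k, pvIsRoot p (pvReach p k x)

def pvSame (p : List Nat) (x y : Nat) : Prop := ∃ r, pvRootR p x r ∧ pvRootR p y r

def pvER (es : List (Nat × Nat)) (a b : Nat) : Prop :=
  Relation.EqvGen (fun u v => (u, v) ∈ es) a b

theorem pvReach_succ_right (p : List Nat) (k x : Nat) :
    pvReach p (k + 1) x = pvFp p (pvReach p k x) := by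
  induction k generalizing x with
  | zero => rfl
  | succ k ih => simpa [pvReach] using ih (pvFp p x)

theorem pvReach_add (p : List Nat) (a b x : Nat) :
    pvReach p (a + b) x = pvReach p b (pvReach p a x) := by
  induction a generalizing x with
  | zero => rw [Nat.zero_add]; rfl
  | succ a ih => simpa [pvReach, Nat.succ_add] using ih (pvFp p x)

theorem pvReach_of_root (p : List Nat) (x : Nat) (h : pvIsRoot p x) (k : Nat) :
    pvReach p k x = x := by
  induction k with
  | zero => rfl
  | succ k ih => rw [pvReach_succ_right, ih, h]

theorem pvRoot_stable (p : List Nat) (x k j : Nat) (h : pvIsRoot p (pvReach p k x)) (hkj : k ≤ j) :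
    pvReach p j x = pvReach p k x := by
  obtain ⟨t, rfl⟩ := Nat.exists_eq_add_of_le hkj
  rw [pvReach_add, pvReach_of_root _ _ h]

theorem pvRootR_unique {p : List Nat} {x r s : Nat} (hr : pvRootR p x r) (hs : pvRootR p x s) :
    r = s := by
  obtain ⟨k1, hk1, hr1⟩ := hr
  obtain ⟨k2, hk2, hr2⟩ := hs
  rcases le_total k1 k2 with h | h
  · rw [← hk1, ← hk2, pvRoot_stable p x k1 k2 (hk1 ▸ hr1) h]
  · rw [← hk1, ← hk2, pvRoot_stable p x k2 k1 (hk2 ▸ hr2) h]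

theorem pvRootR_self {p : List Nat} {x : Nat} (h : pvIsRoot p x) : pvRootR p x x :=
  ⟨0, rfl, h⟩

theorem pvRootR_step {p : List Nat} {x r : Nat} (h : pvRootR p (pvFp p x) r) : pvRootR p x r := by
  obtain ⟨k, hk, hr⟩ := h
  exact ⟨k + 1, by simpa [pvReach] using hk, hr⟩

theorem pvRootR_reach {p : List Nat} {x r : Nat} (h : pvRootR p x r) (j : Nat) :
    pvRootR p (pvReach p j x) r := by
  obtain ⟨k, hk, hr⟩ := h
  rcases le_total j k with hle | hle
  · obtain ⟨t, rfl⟩ := Nat.exists_eq_add_of_le hle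
    exact ⟨t, by rw [← pvReach_add, hk], hr⟩
  · exact ⟨0, by simp only [pvReach]; rw [pvRoot_stable p x k j (hk ▸ hr) hle, hk], hr⟩

theorem pvReach_lt {p : List Nat} (hp : pvInv p) {x : Nat} (hx : x < p.length) (k : Nat) :
    pvReach p k x < p.length := by
  induction k generalizing x with
  | zero => exact hx
  | succ k ih => rw [pvReach]; exact ih (hp x hx).1

theorem pvRootR_lt {p : List Nat} (hp : pvInv p) {x r : Nat} (hx : x < p.length)
    (h : pvRootR p x r) : r < p.length := by
  obtain ⟨k, hk, _⟩ := h
  exact hk ▸ pvReach_lt hp hx k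

theorem pvRootR_total {p : List Nat} (hp : pvInv p) (x : Nat) : ∃ r, pvRootR p x r := by
  by_cases hx : x < p.length
  · obtain ⟨k, hk⟩ := (hp x hx).2
    exact ⟨pvReach p k x, k, rfl, hk⟩
  · refine ⟨x, pvRootR_self ?_⟩
    simp [pvIsRoot, pvFp, List.getD_eq_getElem?_getD, List.getElem?_eq_none (le_of_not_gt hx)]

theorem pvSame_symm {p : List Nat} {x y : Nat} (h : pvSame p x y) : pvSame p y x := by
  obtain ⟨r, h1, h2⟩ := h; exact ⟨r, h2, h1⟩

theorem pvSame_trans {p : List Nat} {x y z : Nat} (h1 : pvSame p x y) (h2 : pvSame p y z) :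
    pvSame p x z := by
  obtain ⟨r, hx, hy⟩ := h1
  obtain ⟨s, hy', hz⟩ := h2
  exact ⟨r, hx, (pvRootR_unique hy' hy) ▸ hz⟩

theorem pvSame_iff_root_eq {p : List Nat} {x y r s : Nat} (hx : pvRootR p x r)
    (hy : pvRootR p y s) : pvSame p x y ↔ r = s := by
  constructor
  · rintro ⟨t, h1, h2⟩
    rw [pvRootR_unique hx h1, pvRootR_unique hy h2]
  · rintro rfl; exact ⟨r, hx, hy⟩

-- pigeonhole: under the invariant, some iterate of x below len(p) is a root
theorem pvWit_bound {p : List Nat} (hp : pvInv p) {x : Nat} (hx : x < p.length) :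
    ∃ k, k < p.length ∧ pvIsRoot p (pvReach p k x) := by
  have hex : ∃ k, pvIsRoot p (pvReach p k x) := (hp x hx).2
  haveI : DecidablePred (fun k => pvIsRoot p (pvReach p k x)) := fun k => by
    unfold pvIsRoot; exact Nat.decEq _ _
  refine ⟨Nat.find hex, ?_, Nat.find_spec hex⟩
  by_contra hge
  rw [not_lt] at hge
  have key : ∀ i j : Nat, i < j → j ≤ Nat.find hex → pvReach p i x = pvReach p j x → False := by
    intro i j hij hjK heq
    have hm : ∀ m, pvReach p (i + m) x = pvReach p (j + m) x := by
      intro m; rw [pvReach_add, pvReach_add, heq]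
    have hroot : pvIsRoot p (pvReach p (i + (Nat.find hex - j)) x) := by
      rw [hm (Nat.find hex - j)]
      have : j + (Nat.find hex - j) = Nat.find hex := by omega
      rw [this]; exact Nat.find_spec hex
    exact Nat.find_min hex (by omega) hroot
  have hinj : Function.Injective
      (fun j : Fin (Nat.find hex + 1) => (⟨pvReach p j x, pvReach_lt hp hx j⟩ : Fin p.length)) := by
    intro a b hab
    simp only [Fin.mk.injEq] at hab
    rcases lt_trichotomy a.val b.val with h | h | h
    · exact absurd (key a b h (by omega) hab) (fun f => f)
    · exact Fin.ext h
    · exact absurd (key b a h (by omega) hab.symm) (fun f => f)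
  have hcard := Fintype.card_le_of_injective _ hinj
  rw [Fintype.card_fin, Fintype.card_fin] at hcard
  omega

-- ---------- B's find computes the root ----------

theorem pvFindB_correct : ∀ (f k : Nat) (p : List Nat) (x : Nat), k ≤ f →
    pvIsRoot p (pvReach p k x) → pvRootR p x (pvFindB f p x) := by
  intro f
  induction f with
  | zero =>
    intro k p x hk hr
    have hk0 : k = 0 := Nat.le_zero.mp hk
    subst hk0
    exact pvRootR_self hr
  | succ f ih =>
    intro k p x hk hr
    have heq : pvFindB (f + 1) p x = if p.getD x x = x then x else pvFindB f p (p.getD x x) := rfl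
    by_cases hroot : p.getD x x = x
    · rw [heq, if_pos hroot]; exact pvRootR_self hroot
    · rw [heq, if_neg hroot]
      have hk0 : k ≠ 0 := by rintro rfl; exact hroot hr
      obtain ⟨k', rfl⟩ := Nat.exists_eq_succ_of_ne_zero hk0
      have hr' : pvIsRoot p (pvReach p k' (pvFp p x)) := hr
      exact pvRootR_step (ih k' p (pvFp p x) (by omega) hr')

theorem pvFindB_eval {p : List Nat} (hp : pvInv p) {x : Nat} (hx : x < p.length) :
    pvRootR p x (pvFindB p.length p x) := by
  obtain ⟨k, hk, hr⟩ := pvWit_bound hp hx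
  exact pvFindB_correct p.length k p x (le_of_lt hk) hr

theorem pvFindB_ker {p : List Nat} (hp : pvInv p) {x y : Nat} (hx : x < p.length)
    (hy : y < p.length) : pvFindB p.length p x = pvFindB p.length p y ↔ pvSame p x y := by
  rw [pvSame_iff_root_eq (pvFindB_eval hp hx) (pvFindB_eval hp hy)]

-- ---------- effect of parent[x] := z on roots ----------

theorem pvFp_set {p : List Nat} {x : Nat} (hx : x < p.length) (z y : Nat) :
    pvFp (p.set x z) y = if y = x then z else pvFp p y := by
  unfold pvFp
  by_cases h : y = x
  · subst h
    rw [List.getD_eq_getElem?_getD, List.getElem?_set_self (by simpa using hx)]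
    simp
  · rw [List.getD_eq_getElem?_getD, List.getElem?_set_ne (by omega), if_neg h,
      List.getD_eq_getElem?_getD]

theorem pvReach_set_avoid {p : List Nat} {x w : Nat} (hx : x < p.length) :
    ∀ (k z : Nat), (∀ j, pvReach p j z ≠ x) → pvReach (p.set x w) k z = pvReach p k z := by
  intro k
  induction k with
  | zero => intro z _; rfl
  | succ k ih =>
    intro z havoid
    have hz : z ≠ x := havoid 0
    have hfp : pvFp (p.set x w) z = pvFp p z := by rw [pvFp_set hx]; simp [hz]
    show pvReach (p.set x w) k (pvFp (p.set x w) z) = pvReach p k (pvFp p z)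
    rw [hfp]
    exact ih (pvFp p z) (fun j => havoid (j + 1))

theorem pvCycle_root {p : List Nat} {x t : Nat} (hcyc : pvReach p t x = x) (ht : 1 ≤ t)
    (hwit : ∃ k, pvIsRoot p (pvReach p k x)) : pvIsRoot p x := by
  obtain ⟨k, hk⟩ := hwit
  have hmul : ∀ m, pvReach p (m * t) x = x := by
    intro m
    induction m with
    | zero => rw [Nat.zero_mul]; rfl
    | succ m ih => rw [Nat.succ_mul, pvReach_add, ih, hcyc]
  have h2 : pvReach p (k * t) x = pvReach p k x :=
    pvRoot_stable p x k (k * t) hk (by nlinarith)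
  rw [← h2, hmul k] at hk
  exact hk

-- path halving: parent[x] := parent[parent[x]] preserves all roots and the invariant
-- (the last conjunct transfers a root-witness for z := parent[parent[x]] with its index)
theorem pvHalve_spec {p : List Nat} (hp : pvInv p) {x : Nat} (hx : x < p.length)
    (hnr : pvFp p x ≠ x) :
    pvInv (p.set x (pvFp p (pvFp p x))) ∧ (p.set x (pvFp p (pvFp p x))).length = p.length ∧
      (∀ y r, pvRootR (p.set x (pvFp p (pvFp p x))) y r ↔ pvRootR p y r) ∧
      (∀ j, pvIsRoot p (pvReach p j (pvFp p (pvFp p x))) →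
        pvIsRoot (p.set x (pvFp p (pvFp p x))) (pvReach (p.set x (pvFp p (pvFp p x))) j (pvFp p (pvFp p x)))) := by
  set z := pvFp p (pvFp p x) with hzdef
  set q := p.set x z with hqdef
  have hlen : q.length = p.length := by simp [hqdef]
  obtain ⟨k0, hk0⟩ := (hp x hx).2
  have hxr : pvRootR p x (pvReach p k0 x) := ⟨k0, rfl, hk0⟩
  have hz2 : z = pvReach p 2 x := rfl
  have hzr : pvRootR p z (pvReach p k0 x) := hz2 ▸ pvRootR_reach hxr 2
  have havoid : ∀ j, pvReach p j z ≠ x := by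
    intro j hjx
    have hcyc : pvReach p (2 + j) x = x := by
      rw [pvReach_add, ← hz2, hjx]
    exact hnr (pvCycle_root hcyc (by omega) ⟨k0, hk0⟩)
  have hwitq : ∀ j, pvIsRoot p (pvReach p j z) → pvIsRoot q (pvReach q j z) := by
    intro j hroot
    rw [pvReach_set_avoid hx j z havoid]
    have hne : pvReach p j z ≠ x := havoid j
    unfold pvIsRoot
    rw [pvFp_set hx, if_neg hne]
    exact hroot
  have hqz : pvRootR q z (pvReach p k0 x) := by
    obtain ⟨kz, hkz, hrz⟩ := hzr
    have hq1 : pvReach q kz z = pvReach p kz z := pvReach_set_avoid hx kz z havoid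
    have hq2 : pvIsRoot q (pvReach q kz z) := hwitq kz (by rw [hkz]; exact hrz)
    rw [hq1, hkz] at hq2
    exact ⟨kz, hq1.trans hkz, hq2⟩
  have hrootq_of : ∀ y, pvIsRoot p y → y ≠ x → pvIsRoot q y := by
    intro y hroot hyx
    unfold pvIsRoot
    rw [pvFp_set hx, if_neg hyx]
    exact hroot
  have hfwd : ∀ k y r, pvReach p k y = r → pvIsRoot p r → pvRootR q y r := by
    intro k
    induction k with
    | zero =>
      intro y r hyr hroot
      have hry : r = y := hyr.symm
      subst hry
      have hyx : r ≠ x := fun h => hnr (h ▸ hroot)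
      exact pvRootR_self (hrootq_of r hroot hyx)
    | succ k ih =>
      intro y r hyr hroot
      by_cases hrooty : pvIsRoot p y
      · have h1 : pvReach p (k + 1) y = y := pvReach_of_root p y hrooty (k + 1)
        rw [h1] at hyr
        subst hyr
        have hyx : y ≠ x := fun h => hnr (h ▸ hrooty)
        exact pvRootR_self (hrootq_of y hrooty hyx)
      · by_cases hyx : y = x
        · subst hyx
          have h1 : pvRootR p y r := ⟨k + 1, hyr, hroot⟩
          have h2 : r = pvReach p k0 y := pvRootR_unique h1 hxr
          subst h2
          refine pvRootR_step (p := q) (x := y) ?_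
          have hfq : pvFp q y = z := by rw [pvFp_set hx]; simp
          rw [hfq]
          exact hqz
        · have hfq : pvFp q y = pvFp p y := by rw [pvFp_set hx, if_neg hyx]
          have hstep : pvReach p k (pvFp p y) = r := hyr
          exact pvRootR_step (hfq ▸ ih (pvFp p y) r hstep hroot)
  have hiff : ∀ y r, pvRootR q y r ↔ pvRootR p y r := by
    intro y r
    constructor
    · intro hqy
      obtain ⟨s, ks, hks, hrs⟩ := pvRootR_total hp y
      have h1 := hfwd ks y s hks hrs
      rw [pvRootR_unique hqy h1]
      exact ⟨ks, hks, hrs⟩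
    · rintro ⟨k, hk, hroot⟩
      exact hfwd k y r hk hroot
  refine ⟨?_, hlen, hiff, hwitq⟩
  intro y hy
  rw [hlen] at hy
  constructor
  · rw [hlen]
    by_cases hyx : y = x
    · show pvFp q y < p.length
      rw [pvFp_set hx, if_pos hyx]
      exact (hp _ (hp x hx).1).1
    · show pvFp q y < p.length
      rw [pvFp_set hx, if_neg hyx]
      exact (hp y hy).1
  · obtain ⟨r, kr, hkr, hroot⟩ := pvRootR_total hp y
    obtain ⟨kq, hkq, hq⟩ := hfwd kr y r hkr hroot
    exact ⟨kq, hkq ▸ hq⟩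

-- linking root rx under root ry: the two classes merge, everything else is unchanged
theorem pvLink_spec {p : List Nat} (hp : pvInv p) {rx ry : Nat} (hrx : rx < p.length)
    (hry : ry < p.length) (hrootx : pvIsRoot p rx) (hrooty : pvIsRoot p ry) (hne : rx ≠ ry) :
    pvInv (p.set rx ry) ∧ (p.set rx ry).length = p.length ∧
      (∀ y r, pvRootR (p.set rx ry) y r ↔ ∃ r₀, pvRootR p y r₀ ∧ r = (if r₀ = rx then ry else r₀)) := by
  set q := p.set rx ry with hqdef
  have hlen : q.length = p.length := by simp [hqdef]
  have hryq : pvIsRoot q ry := by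
    unfold pvIsRoot
    rw [pvFp_set hrx, if_neg (Ne.symm hne)]
    exact hrooty
  have hfwd : ∀ k y r, pvReach p k y = r → pvIsRoot p r →
      pvRootR q y (if r = rx then ry else r) := by
    intro k
    induction k with
    | zero =>
      intro y r hyr hroot
      have hry : r = y := hyr.symm
      subst hry
      by_cases hyx : r = rx
      · subst hyx
        rw [if_pos rfl]
        refine pvRootR_step (p := q) (x := r) ?_
        have hfq : pvFp q r = ry := by rw [pvFp_set hrx, if_pos rfl]
        rw [hfq]
        exact pvRootR_self hryq
      · rw [if_neg hyx]
        refine pvRootR_self ?_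
        unfold pvIsRoot
        rw [pvFp_set hrx, if_neg hyx]
        exact hroot
    | succ k ih =>
      intro y r hyr hroot
      by_cases hrooty' : pvIsRoot p y
      · have h1 : pvReach p (k + 1) y = y := pvReach_of_root p y hrooty' (k + 1)
        rw [h1] at hyr
        subst hyr
        exact ih y y (pvReach_of_root p y hrooty' k) hrooty'
      · have hyx : y ≠ rx := fun h => hrooty' (h ▸ hrootx)
        have hfq : pvFp q y = pvFp p y := by rw [pvFp_set hrx, if_neg hyx]
        have hstep : pvReach p k (pvFp p y) = r := hyr
        exact pvRootR_step (hfq ▸ ih (pvFp p y) r hstep hroot)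
  have hiff : ∀ y r, pvRootR q y r ↔ ∃ r₀, pvRootR p y r₀ ∧ r = (if r₀ = rx then ry else r₀) := by
    intro y r
    constructor
    · intro hqy
      obtain ⟨s, ks, hks, hrs⟩ := pvRootR_total hp y
      have h1 := hfwd ks y s hks hrs
      exact ⟨s, ⟨ks, hks, hrs⟩, pvRootR_unique hqy h1⟩
    · rintro ⟨r₀, ⟨k, hk, hroot⟩, rfl⟩
      exact hfwd k y r₀ hk hroot
  refine ⟨?_, hlen, hiff⟩
  intro y hy
  rw [hlen] at hy
  constructor
  · rw [hlen]
    by_cases hyx : y = rx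
    · subst hyx
      show pvFp q y < p.length
      rw [pvFp_set hrx, if_pos rfl]
      exact hry
    · show pvFp q y < p.length
      rw [pvFp_set hrx, if_neg hyx]
      exact (hp y hy).1
  · obtain ⟨r, kr, hkr, hroot⟩ := pvRootR_total hp y
    obtain ⟨kq, hkq, hq⟩ := hfwd kr y r hkr hroot
    exact ⟨kq, hkq ▸ hq⟩

theorem pvLink_same {p : List Nat} (hp : pvInv p) {rx ry : Nat} (hrx : rx < p.length)
    (hry : ry < p.length) (hrootx : pvIsRoot p rx) (hrooty : pvIsRoot p ry) (hne : rx ≠ ry)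
    {a b : Nat} :
    pvSame (p.set rx ry) a b ↔
      (pvSame p a b ∨ (pvSame p a rx ∧ pvSame p ry b) ∨ (pvSame p a ry ∧ pvSame p rx b)) := by
  obtain ⟨hInvq, hlen, hiff⟩ := pvLink_spec hp hrx hry hrootx hrooty hne
  obtain ⟨ra, hra⟩ := pvRootR_total hp a
  obtain ⟨rb, hrb⟩ := pvRootR_total hp b
  have hqa : pvRootR (p.set rx ry) a (if ra = rx then ry else ra) :=
    (hiff a _).mpr ⟨ra, hra, rfl⟩
  have hqb : pvRootR (p.set rx ry) b (if rb = rx then ry else rb) :=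
    (hiff b _).mpr ⟨rb, hrb, rfl⟩
  rw [pvSame_iff_root_eq hqa hqb, pvSame_iff_root_eq hra hrb,
    pvSame_iff_root_eq hra (pvRootR_self hrootx), pvSame_iff_root_eq (pvRootR_self hrooty) hrb,
    pvSame_iff_root_eq hra (pvRootR_self hrooty), pvSame_iff_root_eq (pvRootR_self hrootx) hrb]
  split_ifs with h1 h2 h2 <;> constructor <;> intro h <;> omega

-- ---------- A's find ----------

theorem pvRootR_root {p : List Nat} {x r : Nat} (h : pvRootR p x r) : pvIsRoot p r := by
  obtain ⟨k, _, hr⟩ := h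
  exact hr

theorem pvFindLoopA_spec : ∀ (f : Nat) (p : List Nat) (x k : Nat), pvInv p → x < p.length →
    k ≤ f → pvIsRoot p (pvReach p k x) →
    pvRootR p x (pvFindLoopA f p x).2 ∧ pvInv (pvFindLoopA f p x).1 ∧
      (pvFindLoopA f p x).1.length = p.length ∧
      (∀ y r, pvRootR (pvFindLoopA f p x).1 y r ↔ pvRootR p y r) := by
  intro f
  induction f with
  | zero =>
    intro p x k hp hx hk hr
    have hk0 : k = 0 := Nat.le_zero.mp hk
    subst hk0
    exact ⟨pvRootR_self hr, hp, rfl, fun y r => Iff.rfl⟩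
  | succ f ih =>
    intro p x k hp hx hk hr
    have heq : pvFindLoopA (f + 1) p x =
        if p.getD x x = x then (p, x)
        else pvFindLoopA f (p.set x (p.getD (p.getD x x) (p.getD x x))) (p.getD (p.getD x x) (p.getD x x)) := rfl
    by_cases hroot : p.getD x x = x
    · rw [heq, if_pos hroot]
      exact ⟨pvRootR_self hroot, hp, rfl, fun y r => Iff.rfl⟩
    · rw [heq, if_neg hroot]
      have hzfp : p.getD (p.getD x x) (p.getD x x) = pvFp p (pvFp p x) := rfl
      rw [hzfp]
      set z := pvFp p (pvFp p x) with hzdef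
      obtain ⟨hInvq, hlenq, hiffq, hwitq⟩ := pvHalve_spec hp hx hroot
      set q := p.set x z with hqdef
      -- a root-witness for z in p at index k - 2
      have hk0 : k ≠ 0 := by rintro rfl; exact hroot hr
      have hwz : pvIsRoot p (pvReach p (k - 2) z) := by
        rcases Nat.lt_or_ge k 2 with h2 | h2
        · have hk1 : k = 1 := by omega
          subst hk1
          -- reach p 1 x = fp p x is a root, hence z = fp p (fp p x) = fp p x
          have hfx : pvIsRoot p (pvFp p x) := hr
          have hzz : z = pvFp p x := hfx
          show pvIsRoot p (pvReach p 0 z)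
          simpa [pvReach, hzz] using hfx
        · have hsplit : pvReach p (k - 2) z = pvReach p k x := by
            have h1 : k = 2 + (k - 2) := by omega
            have h2' : pvReach p (2 + (k - 2)) x = pvReach p (k - 2) (pvReach p 2 x) :=
              pvReach_add p 2 (k - 2) x
            rw [← h1] at h2'
            exact h2'.symm
          rw [hsplit]
          exact hr
      have hzlt : z < p.length := (hp _ (hp x hx).1).1
      have hzltq : z < q.length := by rw [hlenq]; exact hzlt
      have hwq : pvIsRoot q (pvReach q (k - 2) z) := hwitq (k - 2) hwz
      have hkf : k - 2 ≤ f := by omega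
      obtain ⟨hr', hInv', hlen', hiff'⟩ := ih q z (k - 2) hInvq hzltq hkf hwq
      refine ⟨?_, hInv', hlen'.trans hlenq, fun y r => (hiff' y r).trans (hiffq y r)⟩
      -- root of the recursive call is also x's root in p
      have hqx : pvRootR q x (pvFindLoopA f q z).2 := by
        refine pvRootR_step (p := q) (x := x) ?_
        have hfq : pvFp q x = z := by rw [pvFp_set hx]; simp
        rw [hfq]
        exact hr'
      exact (hiffq x _).mp hqx

theorem pvFindA_spec {p : List Nat} (hp : pvInv p) {x : Nat} (hx : x < p.length) :
    pvRootR p x (pvFindA p x).2 ∧ pvInv (pvFindA p x).1 ∧ (pvFindA p x).1.length = p.length ∧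
      (∀ y r, pvRootR (pvFindA p x).1 y r ↔ pvRootR p y r) := by
  obtain ⟨k, hk, hr⟩ := pvWit_bound hp hx
  exact pvFindLoopA_spec p.length p x k hp hx (le_of_lt hk) hr

-- ---------- both union steps merge exactly the classes of the edge's endpoints ----------

theorem pvSame_congr {p q : List Nat} (h : ∀ y r, pvRootR q y r ↔ pvRootR p y r) (u v : Nat) :
    pvSame q u v ↔ pvSame p u v := by
  unfold pvSame
  constructor
  · rintro ⟨r, h1, h2⟩; exact ⟨r, (h u r).mp h1, (h v r).mp h2⟩
  · rintro ⟨r, h1, h2⟩; exact ⟨r, (h u r).mpr h1, (h v r).mpr h2⟩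

theorem pvMerge_same {p : List Nat} (hp : pvInv p) {a b rx ry : Nat}
    (hra : pvRootR p a rx) (hrb : pvRootR p b ry) (hne : rx ≠ ry)
    (halt : a < p.length) (hblt : b < p.length) (u v : Nat) :
    pvSame (p.set rx ry) u v ↔
      (pvSame p u v ∨ (pvSame p u a ∧ pvSame p b v) ∨ (pvSame p u b ∧ pvSame p a v)) := by
  have hrxlt := pvRootR_lt hp halt hra
  have hrylt := pvRootR_lt hp hblt hrb
  have hrootx := pvRootR_root hra
  have hrooty := pvRootR_root hrb
  rw [pvLink_same hp hrxlt hrylt hrootx hrooty hne]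
  have hax : pvSame p a rx := ⟨rx, hra, pvRootR_self hrootx⟩
  have hby : pvSame p b ry := ⟨ry, hrb, pvRootR_self hrooty⟩
  have h1 : pvSame p u rx ↔ pvSame p u a :=
    ⟨fun h => pvSame_trans h (pvSame_symm hax), fun h => pvSame_trans h hax⟩
  have h2 : pvSame p ry v ↔ pvSame p b v :=
    ⟨fun h => pvSame_trans hby h, fun h => pvSame_trans (pvSame_symm hby) h⟩
  have h3 : pvSame p u ry ↔ pvSame p u b :=
    ⟨fun h => pvSame_trans h (pvSame_symm hby), fun h => pvSame_trans h hby⟩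
  have h4 : pvSame p rx v ↔ pvSame p a v :=
    ⟨fun h => pvSame_trans hax h, fun h => pvSame_trans (pvSame_symm hax) h⟩
  exact or_congr Iff.rfl (or_congr (and_congr h1 h2) (and_congr h3 h4))

theorem pvSame_collapse {p : List Nat} {x y : Nat} (hxy : pvSame p x y) (u v : Nat) :
    (pvSame p u v ∨ (pvSame p u x ∧ pvSame p y v) ∨ (pvSame p u y ∧ pvSame p x v)) ↔
      pvSame p u v := by
  constructor
  · rintro (h | ⟨h1, h2⟩ | ⟨h1, h2⟩)
    · exact h
    · exact pvSame_trans (pvSame_trans h1 hxy) h2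
    · exact pvSame_trans (pvSame_trans h1 (pvSame_symm hxy)) h2
  · exact Or.inl

theorem pvUnionA_spec {p : List Nat} (hp : pvInv p) {x y : Nat} (hx : x < p.length)
    (hy : y < p.length) :
    pvInv (pvUnionA p x y) ∧ (pvUnionA p x y).length = p.length ∧
      (∀ u v, pvSame (pvUnionA p x y) u v ↔
        (pvSame p u v ∨ (pvSame p u x ∧ pvSame p y v) ∨ (pvSame p u y ∧ pvSame p x v))) := by
  obtain ⟨hr1, hI1, hL1, hf1⟩ := pvFindA_spec hp hx
  set p1 := (pvFindA p x).1 with hp1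
  set rx := (pvFindA p x).2 with hrx
  have hy1 : y < p1.length := by rw [hL1]; exact hy
  obtain ⟨hr2, hI2, hL2, hf2⟩ := pvFindA_spec hI1 hy1
  set p2 := (pvFindA p1 y).1 with hp2
  set ry := (pvFindA p1 y).2 with hry
  have hL : p2.length = p.length := hL2.trans hL1
  have hrx2 : pvRootR p2 x rx := (hf2 x rx).mpr ((hf1 x rx).mpr hr1)
  have hry2 : pvRootR p2 y ry := (hf2 y ry).mpr hr2
  have hx2 : x < p2.length := by rw [hL]; exact hx
  have hy2 : y < p2.length := by rw [hL]; exact hy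
  have hsame2 : ∀ u v, pvSame p2 u v ↔ pvSame p u v := fun u v =>
    (pvSame_congr hf2 u v).trans (pvSame_congr hf1 u v)
  have hgoal : pvUnionA p x y = if rx ≠ ry then p2.set rx ry else p2 := rfl
  by_cases hne : rx = ry
  · rw [hgoal, if_neg (by simp [hne])]
    refine ⟨hI2, hL, fun u v => ?_⟩
    have hxy : pvSame p x y := by
      rw [← hsame2]
      exact ⟨rx, hrx2, hne ▸ hry2⟩
    rw [hsame2]
    exact (pvSame_collapse hxy u v).symm
  · rw [hgoal, if_pos (by simp [hne])]
    obtain ⟨hIq, hLq, _⟩ := pvLink_spec hI2 (pvRootR_lt hI2 hx2 hrx2) (pvRootR_lt hI2 hy2 hry2)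
      (pvRootR_root hrx2) (pvRootR_root hry2) hne
    refine ⟨hIq, hLq.trans hL, fun u v => ?_⟩
    rw [pvMerge_same hI2 hrx2 hry2 hne hx2 hy2 u v]
    exact or_congr (hsame2 u v) (or_congr (and_congr (hsame2 u x) (hsame2 y v))
      (and_congr (hsame2 u y) (hsame2 x v)))

theorem pvUnionB_spec (st : List Nat × List Nat) (e : Nat × Nat) (hp : pvInv st.1)
    (hx : e.1 < st.1.length) (hy : e.2 < st.1.length) :
    pvInv (pvUnionStepB st e).1 ∧ (pvUnionStepB st e).1.length = st.1.length ∧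
      (∀ u v, pvSame (pvUnionStepB st e).1 u v ↔
        (pvSame st.1 u v ∨ (pvSame st.1 u e.1 ∧ pvSame st.1 e.2 v) ∨
          (pvSame st.1 u e.2 ∧ pvSame st.1 e.1 v))) := by
  set p := st.1 with hpdef
  set ra := pvFindB p.length p e.1 with hra
  set rb := pvFindB p.length p e.2 with hrb
  have hr1 : pvRootR p e.1 ra := pvFindB_eval hp hx
  have hr2 : pvRootR p e.2 rb := pvFindB_eval hp hy
  by_cases hne : ra = rb
  · have hgoal : (pvUnionStepB st e).1 = p := by
      unfold pvUnionStepB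
      simp only [← hpdef, ← hra, ← hrb, if_pos hne]
    rw [hgoal]
    refine ⟨hp, rfl, fun u v => ?_⟩
    have hxy : pvSame p e.1 e.2 := ⟨ra, hr1, hne ▸ hr2⟩
    exact (pvSame_collapse hxy u v).symm
  · by_cases hsz : st.2.getD ra 0 < st.2.getD rb 0
    · have hgoal : (pvUnionStepB st e).1 = p.set ra rb := by
        unfold pvUnionStepB
        simp only [← hpdef, ← hra, ← hrb, if_neg hne, if_pos hsz]
      rw [hgoal]
      obtain ⟨hIq, hLq, _⟩ := pvLink_spec hp (pvRootR_lt hp hx hr1) (pvRootR_lt hp hy hr2)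
        (pvRootR_root hr1) (pvRootR_root hr2) hne
      refine ⟨hIq, hLq, fun u v => ?_⟩
      rw [pvMerge_same hp hr1 hr2 hne hx hy u v]
    · have hgoal : (pvUnionStepB st e).1 = p.set rb ra := by
        unfold pvUnionStepB
        simp only [← hpdef, ← hra, ← hrb, if_neg hne, if_neg hsz]
      rw [hgoal]
      obtain ⟨hIq, hLq, _⟩ := pvLink_spec hp (pvRootR_lt hp hy hr2) (pvRootR_lt hp hx hr1)
        (pvRootR_root hr2) (pvRootR_root hr1) (Ne.symm hne)
      refine ⟨hIq, hLq, fun u v => ?_⟩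
      rw [pvMerge_same hp hr2 hr1 (Ne.symm hne) hy hx u v]
      tauto

-- ---------- folding unions over an edge list = equivalence closure of the edges ----------

theorem pvER_nil (a b : Nat) : pvER [] a b ↔ a = b := by
  constructor
  · intro h
    induction h with
    | rel u v huv => simp at huv
    | refl a => rfl
    | symm a b _ ih => exact ih.symm
    | trans a b c _ _ ih1 ih2 => exact ih1.trans ih2
  · rintro rfl
    exact Relation.EqvGen.refl a

theorem pvER_mono {es es' : List (Nat × Nat)} (h : ∀ e ∈ es, e ∈ es') {a b : Nat}
    (hab : pvER es a b) : pvER es' a b := by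
  refine Relation.EqvGen.mono ?_ hab
  intro u v huv
  exact h (u, v) huv

theorem pvER_snoc (es : List (Nat × Nat)) (e : Nat × Nat) (a b : Nat) :
    pvER (es ++ [e]) a b ↔
      (pvER es a b ∨ (pvER es a e.1 ∧ pvER es e.2 b) ∨ (pvER es a e.2 ∧ pvER es e.1 b)) := by
  constructor
  · intro h
    induction h with
    | rel u v huv =>
      rcases List.mem_append.mp huv with h | h
      · exact Or.inl (Relation.EqvGen.rel _ _ h)
      · simp only [List.mem_singleton] at h
        have h1 : u = e.1 := congrArg Prod.fst h
        have h2 : v = e.2 := congrArg Prod.snd h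
        subst h1; subst h2
        exact Or.inr (Or.inl ⟨Relation.EqvGen.refl _, Relation.EqvGen.refl _⟩)
    | refl a => exact Or.inl (Relation.EqvGen.refl a)
    | symm a b _ ih =>
      rcases ih with h | ⟨h1, h2⟩ | ⟨h1, h2⟩
      · exact Or.inl (Relation.EqvGen.symm _ _ h)
      · exact Or.inr (Or.inr ⟨Relation.EqvGen.symm _ _ h2, Relation.EqvGen.symm _ _ h1⟩)
      · exact Or.inr (Or.inl ⟨Relation.EqvGen.symm _ _ h2, Relation.EqvGen.symm _ _ h1⟩)
    | trans a b c _ _ ih1 ih2 =>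
      rcases ih1 with h | ⟨h1, h2⟩ | ⟨h1, h2⟩ <;> rcases ih2 with g | ⟨g1, g2⟩ | ⟨g1, g2⟩
      · exact Or.inl (Relation.EqvGen.trans _ _ _ h g)
      · exact Or.inr (Or.inl ⟨Relation.EqvGen.trans _ _ _ h g1, g2⟩)
      · exact Or.inr (Or.inr ⟨Relation.EqvGen.trans _ _ _ h g1, g2⟩)
      · exact Or.inr (Or.inl ⟨h1, Relation.EqvGen.trans _ _ _ h2 g⟩)
      · exact Or.inr (Or.inl ⟨h1, g2⟩)
      · exact Or.inl (Relation.EqvGen.trans _ _ _ h1 g2)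
      · exact Or.inr (Or.inr ⟨h1, Relation.EqvGen.trans _ _ _ h2 g⟩)
      · exact Or.inl (Relation.EqvGen.trans _ _ _ h1 g2)
      · exact Or.inr (Or.inr ⟨h1, g2⟩)
  · have hsub : ∀ e' ∈ es, e' ∈ es ++ [e] := fun e' he' => List.mem_append_left _ he'
    have hrel : pvER (es ++ [e]) e.1 e.2 :=
      Relation.EqvGen.rel _ _ (List.mem_append_right _ (by simp))
    rintro (h | ⟨h1, h2⟩ | ⟨h1, h2⟩)
    · exact pvER_mono hsub h
    · exact Relation.EqvGen.trans _ _ _ (pvER_mono hsub h1)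
        (Relation.EqvGen.trans _ _ _ hrel (pvER_mono hsub h2))
    · exact Relation.EqvGen.trans _ _ _ (pvER_mono hsub h1)
        (Relation.EqvGen.trans _ _ _ (Relation.EqvGen.symm _ _ hrel) (pvER_mono hsub h2))

theorem pvFoldUnion {σ : Type} (proj : σ → List Nat) (ustep : σ → Nat × Nat → σ)
    (hspec : ∀ st e, pvInv (proj st) → e.1 < (proj st).length → e.2 < (proj st).length →
      pvInv (proj (ustep st e)) ∧ (proj (ustep st e)).length = (proj st).length ∧
        (∀ u v, pvSame (proj (ustep st e)) u v ↔
          (pvSame (proj st) u v ∨ (pvSame (proj st) u e.1 ∧ pvSame (proj st) e.2 v) ∨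
            (pvSame (proj st) u e.2 ∧ pvSame (proj st) e.1 v)))) :
    ∀ (es done : List (Nat × Nat)) (st : σ), pvInv (proj st) →
      (∀ e ∈ es, e.1 < (proj st).length ∧ e.2 < (proj st).length) →
      (∀ u v, pvSame (proj st) u v ↔ pvER done u v) →
      pvInv (proj (es.foldl ustep st)) ∧
        (proj (es.foldl ustep st)).length = (proj st).length ∧
        (∀ u v, pvSame (proj (es.foldl ustep st)) u v ↔ pvER (done ++ es) u v) := by
  intro es
  induction es with
  | nil =>
    intro done st hInv _ hsame
    refine ⟨hInv, rfl, fun u v => ?_⟩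
    simpa using hsame u v
  | cons e es ih =>
    intro done st hInv hbnd hsame
    have he := hbnd e List.mem_cons_self
    obtain ⟨hI1, hL1, hS1⟩ := hspec st e hInv he.1 he.2
    have hsame' : ∀ u v, pvSame (proj (ustep st e)) u v ↔ pvER (done ++ [e]) u v := by
      intro u v
      rw [hS1, pvER_snoc]
      exact or_congr (hsame u v)
        (or_congr (and_congr (hsame u e.1) (hsame e.2 v)) (and_congr (hsame u e.2) (hsame e.1 v)))
    have hbnd' : ∀ e' ∈ es, e'.1 < (proj (ustep st e)).length ∧ e'.2 < (proj (ustep st e)).length := by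
      intro e' he'
      rw [hL1]
      exact hbnd e' (List.mem_cons_of_mem _ he')
    obtain ⟨hI2, hL2, hS2⟩ := ih (done ++ [e]) (ustep st e) hI1 hbnd' hsame'
    refine ⟨by simpa using hI2, by simp only [List.foldl_cons]; rw [hL2, hL1], fun u v => ?_⟩
    simp only [List.foldl_cons]
    rw [hS2 u v]
    have : done ++ [e] ++ es = done ++ e :: es := by simp
    rw [this]

theorem pvFp_range (n x : Nat) : pvFp (List.range n) x = x := by
  unfold pvFp
  by_cases h : x < n
  · rw [List.getD_eq_getElem _ _ (by simpa using h), List.getElem_range]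
  · rw [List.getD_eq_getElem?_getD, List.getElem?_eq_none (by simpa using h)]
    rfl

theorem pvRange_inv (n : Nat) : pvInv (List.range n) := by
  intro x hx
  refine ⟨?_, 0, pvFp_range n x⟩
  rw [pvFp_range]
  simpa using hx

theorem pvRange_same (n : Nat) (u v : Nat) : pvSame (List.range n) u v ↔ u = v := by
  have hroot : ∀ x r, pvRootR (List.range n) x r ↔ r = x := by
    intro x r
    constructor
    · rintro ⟨k, hk, _⟩
      rw [← hk]
      clear hk
      induction k with
      | zero => rfl
      | succ k ih => rw [pvReach_succ_right, ih, pvFp_range]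
    · rintro rfl
      exact pvRootR_self (pvFp_range n _)
  unfold pvSame
  constructor
  · rintro ⟨r, h1, h2⟩
    rw [← (hroot u r).mp h1, ← (hroot v r).mp h2]
  · rintro rfl
    exact ⟨u, (hroot u u).mpr rfl, (hroot u u).mpr rfl⟩

-- ---------- the two edge lists generate the same equivalence ----------

def pvEA (created : List (String × String × String)) (n : Nat) : List (Nat × Nat) :=
  (List.range n).flatMap (fun i =>
    ((List.range' (i + 1) (n - (i + 1))).filter (fun j => pvRel created i j)).map (fun j => (i, j)))

theorem pvMem_EA (created : List (String × String × String)) (n : Nat) (e : Nat × Nat) :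
    e ∈ pvEA created n ↔ e.1 < n ∧ e.2 < n ∧ e.1 < e.2 ∧ pvRel created e.1 e.2 = true := by
  obtain ⟨i, j⟩ := e
  simp only [pvEA, List.mem_flatMap, List.mem_map, List.mem_filter, List.mem_range'_1,
    List.mem_range]
  constructor
  · rintro ⟨i', hi', j', ⟨⟨hj1, hj2⟩, hrel⟩, heq⟩
    injection heq with e1 e2
    subst e1; subst e2
    exact ⟨hi', by omega, by omega, hrel⟩
  · rintro ⟨h1, h2, h3, h4⟩
    exact ⟨i, h1, j, ⟨⟨by omega, by omega⟩, h4⟩, rfl⟩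

theorem pvZipTail_mem {α : Type} {l : List α} {e : α × α} (h : e ∈ l.zip l.tail) :
    e.1 ∈ l ∧ e.2 ∈ l := by
  obtain ⟨h1, h2⟩ := List.of_mem_zip h
  exact ⟨h1, List.mem_of_mem_tail h2⟩

theorem pvZipTail_pairwise {α : Type} {R : α → α → Prop} : ∀ {l : List α}, l.Pairwise R →
    ∀ {e : α × α}, e ∈ l.zip l.tail → R e.1 e.2 := by
  intro l
  induction l with
  | nil => intro _ e he; simp at he
  | cons a l ih =>
    intro hl e he
    cases l with
    | nil => simp at he
    | cons b l' =>
      rw [List.pairwise_cons] at hl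
      simp only [List.tail_cons, List.zip_cons_cons, List.mem_cons] at he
      rcases he with rfl | he
      · exact hl.1 b List.mem_cons_self
      · exact ih hl.2 he

theorem pvHead_conn {S : Nat → Nat → Prop} : ∀ (l : List Nat) (x : Nat),
    (∀ e ∈ (x :: l).zip l, S e.1 e.2) → ∀ y ∈ x :: l, Relation.EqvGen S x y := by
  intro l
  induction l with
  | nil =>
    intro x _ y hy
    simp only [List.mem_singleton] at hy
    subst hy
    exact Relation.EqvGen.refl _
  | cons z l' ih =>
    intro x hS y hy
    have hxz : S x z := hS (x, z) (by simp)
    rcases List.mem_cons.mp hy with rfl | hy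
    · exact Relation.EqvGen.refl y
    · have hrest : ∀ e ∈ (z :: l').zip l', S e.1 e.2 := by
        intro e he
        apply hS
        simp only [List.zip_cons_cons, List.mem_cons]
        exact Or.inr he
      exact Relation.EqvGen.trans _ _ _ (Relation.EqvGen.rel _ _ hxz) (ih z hrest y hy)

theorem pvChain_conn {S : Nat → Nat → Prop} : ∀ (l : List Nat),
    (∀ e ∈ l.zip l.tail, S e.1 e.2) → ∀ a ∈ l, ∀ b ∈ l, Relation.EqvGen S a b := by
  intro l hS a ha b hb
  cases l with
  | nil => simp at ha
  | cons x l' =>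
    have h1 := pvHead_conn l' x (by simpa using hS) a ha
    have h2 := pvHead_conn l' x (by simpa using hS) b hb
    exact Relation.EqvGen.trans _ _ _ (Relation.EqvGen.symm _ _ h1) h2

theorem pvER_eq (created : List (String × String × String)) (n : Nat)
    (vals : List (List Nat))
    (hgood : ∀ idxs ∈ vals, idxs.Pairwise (· < ·) ∧ (∀ i ∈ idxs, i < n) ∧
      (∀ i ∈ idxs, ∀ j ∈ idxs, pvRel created i j = true))
    (hcompl : ∀ i j, i < n → j < n → i < j → pvRel created i j = true →
      ∃ idxs ∈ vals, i ∈ idxs ∧ j ∈ idxs) (a b : Nat) :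
    pvER (pvEA created n) a b ↔ pvER (vals.flatMap (fun idxs => idxs.zip idxs.tail)) a b := by
  constructor
  · intro h
    induction h with
    | rel u v huv =>
      rw [pvMem_EA] at huv
      obtain ⟨h1, h2, h3, h4⟩ := huv
      obtain ⟨idxs, hmem, hu, hv⟩ := hcompl u v h1 h2 h3 h4
      refine pvChain_conn idxs ?_ u hu v hv
      intro e he
      exact List.mem_flatMap.mpr ⟨idxs, hmem, he⟩
    | refl a => exact Relation.EqvGen.refl a
    | symm a b _ ih => exact Relation.EqvGen.symm _ _ ih
    | trans a b c _ _ ih1 ih2 => exact Relation.EqvGen.trans _ _ _ ih1 ih2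
  · intro h
    induction h with
    | rel u v huv =>
      obtain ⟨idxs, hmem, he⟩ := List.mem_flatMap.mp huv
      obtain ⟨hpw, hlt, hrel⟩ := hgood idxs hmem
      obtain ⟨hu, hv⟩ := pvZipTail_mem he
      refine Relation.EqvGen.rel _ _ ((pvMem_EA created n ((u, v) : Nat × Nat)).mpr ?_)
      exact ⟨hlt u hu, hlt v hv, pvZipTail_pairwise hpw he, hrel u hu v hv⟩
    | refl a => exact Relation.EqvGen.refl a
    | symm a b _ ih => exact Relation.EqvGen.symm _ _ ih
    | trans a b c _ _ ih1 ih2 => exact Relation.EqvGen.trans _ _ _ ih1 ih2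

-- ---------- dict grouping: values of a keyed modify-append fold ----------

theorem pvKeyedValues {κ β : Type} [BEq κ] [LawfulBEq κ] (l : List Nat) (K : Nat → κ)
    (f : Nat → β) :
    (l.foldl (fun (d : PySem.Dict κ (List β)) i => d.modify (K i) [] (· ++ [f i]))
        PySem.Dict.empty).values
      = (PySem.Set.ofList (l.map K)).map (fun c => ((l.filter (fun i => K i == c)).map f)) := by
  have hnodup : (l.foldl (fun (d : PySem.Dict κ (List β)) i => d.modify (K i) [] (· ++ [f i]))
      PySem.Dict.empty).keys.Nodup :=
    PySem.Dict.nodup_keys_foldl_modify_key l K [] (fun _ i => (· ++ [f i])) PySem.Dict.empty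
      PySem.Dict.nodup_keys_empty
  have hkeys : (l.foldl (fun (d : PySem.Dict κ (List β)) i => d.modify (K i) [] (· ++ [f i]))
      PySem.Dict.empty).keys = PySem.Set.ofList (l.map K) := by
    rw [PySem.Dict.keys_foldl_modify_key l K [] (fun _ i => (· ++ [f i])) PySem.Dict.empty,
      PySem.Dict.keys_empty]
    rfl
  rw [PySem.Dict.values_eq_map_keys _ hnodup [], hkeys]
  refine List.map_congr_left ?_
  intro c _
  have hmap : (l.foldl (fun (d : PySem.Dict κ (List β)) i => d.modify (K i) [] (· ++ [f i]))
      PySem.Dict.empty)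
      = ((l.map (fun i => (K i, f i))).foldl (fun d p => d.modify p.1 [] (· ++ [p.2]))
        PySem.Dict.empty) := by
    rw [List.foldl_map]
  rw [hmap, PySem.Dict.getD_foldl_modify_append, List.filter_map, List.map_map]
  rfl

def pvReps {κ : Type} [BEq κ] (K : Nat → κ) (l : List Nat) (acc : List Nat) : List Nat :=
  l.foldl (fun a i => if a.any (fun r => K r == K i) then a else a ++ [i]) acc

theorem pvContains_map {κ : Type} [BEq κ] [LawfulBEq κ] (l : List Nat) (f : Nat → κ) (z : κ) :
    (l.map f).contains z = l.any (fun r => f r == z) := by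
  induction l with
  | nil => rfl
  | cons a l ih =>
    have hsw : (z == f a) = (f a == z) := by
      rw [Bool.eq_iff_iff]
      simp only [beq_iff_eq]
      exact eq_comm
    simp only [List.map_cons, List.contains_cons, List.any_cons, ih, hsw]

theorem pvReps_map {κ : Type} [BEq κ] [LawfulBEq κ] (K : Nat → κ) :
    ∀ (l acc : List Nat), (l.map K).foldl PySem.Set.add (acc.map K) = (pvReps K l acc).map K := by
  intro l
  induction l with
  | nil => intro acc; rfl
  | cons a l ih =>
    intro acc
    have hstep : pvReps K (a :: l) acc =
        pvReps K l (if acc.any (fun r => K r == K a) then acc else acc ++ [a]) := rfl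
    have hadd : PySem.Set.add (acc.map K) (K a) =
        (if acc.any (fun r => K r == K a) then acc else acc ++ [a]).map K := by
      show (if (acc.map K).contains (K a) then acc.map K else acc.map K ++ [K a]) = _
      rw [pvContains_map]
      split_ifs with h
      · rfl
      · simp
    calc ((a :: l).map K).foldl PySem.Set.add (acc.map K)
        = (l.map K).foldl PySem.Set.add (PySem.Set.add (acc.map K) (K a)) := rfl
      _ = (l.map K).foldl PySem.Set.add
            ((if acc.any (fun r => K r == K a) then acc else acc ++ [a]).map K) := by rw [hadd]
      _ = (pvReps K l (if acc.any (fun r => K r == K a) then acc else acc ++ [a])).map K := ih _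
      _ = (pvReps K (a :: l) acc).map K := by rw [hstep]

theorem pvReps_subset {κ : Type} [BEq κ] (K : Nat → κ) :
    ∀ (l acc : List Nat) (r : Nat), r ∈ pvReps K l acc → r ∈ acc ∨ r ∈ l := by
  intro l
  induction l with
  | nil => intro acc r hr; exact Or.inl hr
  | cons a l ih =>
    intro acc r hr
    have hstep : pvReps K (a :: l) acc =
        pvReps K l (if acc.any (fun r => K r == K a) then acc else acc ++ [a]) := rfl
    rw [hstep] at hr
    rcases ih _ r hr with h | h
    · split_ifs at h with hc
      · exact Or.inl h
      · rcases List.mem_append.mp h with h | h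
        · exact Or.inl h
        · simp only [List.mem_singleton] at h
          subst h
          exact Or.inr List.mem_cons_self
    · exact Or.inr (List.mem_cons_of_mem _ h)

theorem pvReps_congr {κ κ' : Type} [BEq κ] [LawfulBEq κ] [BEq κ'] [LawfulBEq κ']
    {K : Nat → κ} {K' : Nat → κ'} {S : List Nat}
    (hker : ∀ i ∈ S, ∀ j ∈ S, K i = K j ↔ K' i = K' j) :
    ∀ (l acc : List Nat), (∀ i ∈ l, i ∈ S) → (∀ i ∈ acc, i ∈ S) →
      pvReps K l acc = pvReps K' l acc := by
  intro l
  induction l with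
  | nil => intro acc _ _; rfl
  | cons a l ih =>
    intro acc hl hacc
    have hcond : (acc.any fun r => K r == K a) = (acc.any fun r => K' r == K' a) := by
      induction acc with
      | nil => rfl
      | cons b acc ihacc =>
        simp only [List.any_cons]
        rw [ihacc (fun i hi => hacc i (List.mem_cons_of_mem _ hi))]
        have hiff := hker b (hacc b List.mem_cons_self) a (hl a List.mem_cons_self)
        have : (K b == K a) = (K' b == K' a) := by
          rw [Bool.eq_iff_iff]
          simp only [beq_iff_eq]
          exact hiff
        rw [this]
    have hstep : pvReps K (a :: l) acc =
        pvReps K l (if acc.any (fun r => K r == K a) then acc else acc ++ [a]) := rfl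
    have hstep' : pvReps K' (a :: l) acc =
        pvReps K' l (if acc.any (fun r => K' r == K' a) then acc else acc ++ [a]) := rfl
    rw [hstep, hstep', ← hcond]
    refine ih _ (fun i hi => hl i (List.mem_cons_of_mem _ hi)) ?_
    intro i hi
    split_ifs at hi with hc
    · exact hacc i hi
    · rcases List.mem_append.mp hi with h | h
      · exact hacc i h
      · simp only [List.mem_singleton] at h
        subst h
        exact hl i List.mem_cons_self

theorem pvKeyedValues_congr {κ κ' β : Type} [BEq κ] [LawfulBEq κ] [BEq κ'] [LawfulBEq κ']
    (l : List Nat) (K : Nat → κ) (K' : Nat → κ') (f : Nat → β)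
    (hker : ∀ i ∈ l, ∀ j ∈ l, K i = K j ↔ K' i = K' j) :
    (l.foldl (fun (d : PySem.Dict κ (List β)) i => d.modify (K i) [] (· ++ [f i]))
        PySem.Dict.empty).values
      = (l.foldl (fun (d : PySem.Dict κ' (List β)) i => d.modify (K' i) [] (· ++ [f i]))
          PySem.Dict.empty).values := by
  rw [pvKeyedValues, pvKeyedValues]
  have hofK : PySem.Set.ofList (l.map K) = (pvReps K l []).map K := by
    rw [PySem.Set.ofList_eq_foldl]
    exact pvReps_map K l []
  have hofK' : PySem.Set.ofList (l.map K') = (pvReps K' l []).map K' := by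
    rw [PySem.Set.ofList_eq_foldl]
    exact pvReps_map K' l []
  rw [hofK, hofK', List.map_map, List.map_map]
  rw [pvReps_congr hker l [] (fun i h => h) (fun i h => absurd h (List.not_mem_nil))]
  refine List.map_congr_left ?_
  intro r hr
  have hrl : r ∈ l := by
    rcases pvReps_subset K' l [] r hr with h | h
    · exact absurd h (List.not_mem_nil)
    · exact h
  show (l.filter (fun i => K i == K r)).map f = (l.filter (fun i => K' i == K' r)).map f
  congr 1
  refine List.filter_congr ?_
  intro i hi
  have hiff := hker i hi r hrl
  rw [Bool.eq_iff_iff]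
  simp only [beq_iff_eq]
  exact hiff

-- ---------- A's stateful comp loop is a keyed fold over the final roots ----------

theorem pvCompA_eq (created : List (String × String × String)) (pA : List Nat)
    (hA : pvInv pA) :
    ∀ (l : List Nat) (p : List Nat) (d : PySem.Dict Nat (List String)), pvInv p →
      p.length = pA.length → (∀ i ∈ l, i < p.length) →
      (∀ y r, pvRootR p y r ↔ pvRootR pA y r) →
      (l.foldl (fun (st : List Nat × PySem.Dict Nat (List String)) i =>
          ((pvFindA st.1 i).1, st.2.modify (pvFindA st.1 i).2 [] (· ++ [(pvItem created i).1])))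
          (p, d)).2
        = l.foldl (fun d i =>
            d.modify (pvFindB pA.length pA i) [] (· ++ [(pvItem created i).1])) d := by
  intro l
  induction l with
  | nil => intro p d _ _ _ _; rfl
  | cons i l ih =>
    intro p d hp hlen hil hRR
    obtain ⟨hr, hI, hL, hiff⟩ := pvFindA_spec hp (hil i List.mem_cons_self)
    have hkey : (pvFindA p i).2 = pvFindB pA.length pA i := by
      have h1 : pvRootR pA i ((pvFindA p i).2) := (hRR i _).mp hr
      have h2 : pvRootR pA i (pvFindB pA.length pA i) :=
        pvFindB_eval hA (by rw [← hlen]; exact hil i List.mem_cons_self)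
      exact pvRootR_unique h1 h2
    simp only [List.foldl_cons]
    rw [hkey]
    exact ih (pvFindA p i).1 _ hI (hL.trans hlen)
      (fun j hj => by rw [hL]; exact hil j (List.mem_cons_of_mem _ hj))
      (fun y r => (hiff y r).trans (hRR y r))

-- ---------- the pair emission loops ----------

theorem pvDrop_map {α : Type} (ms : List α) (d : α) (s : Nat) :
    (List.range' s (ms.length - s)).map (fun j => ms.getD j d) = ms.drop s := by
  refine List.ext_getElem (by simp) ?_
  intro k h1 h2
  simp only [List.getElem_map, List.getElem_range', List.getElem_drop, one_mul]
  rw [List.getD_eq_getElem ms d (by simp at h1; omega)]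

theorem pvEmit_eq : ∀ (vs : List (List String)) (out : List (String × String)),
    vs.foldl (fun out ms =>
      if ms.length < 2 then out
      else (List.range ms.length).foldl (fun out i =>
        (List.range' (i + 1) (ms.length - (i + 1))).foldl (fun out j =>
          PySem.Set.add out (undirected_pair_key (ms.getD i "") (ms.getD j ""))) out) out) out
    = (vs.flatMap (fun ms =>
        (List.range ms.length).flatMap (fun k =>
          (ms.drop (k + 1)).map (fun b => undirected_pair_key (ms.getD k "") b)))).foldl
        PySem.Set.add out := by
  intro vs
  induction vs with
  | nil => intro out; rfl
  | cons ms vs ih =>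
    intro out
    simp only [List.foldl_cons, List.flatMap_cons]
    rw [List.foldl_append]
    have hone : (if ms.length < 2 then out
        else (List.range ms.length).foldl (fun out i =>
          (List.range' (i + 1) (ms.length - (i + 1))).foldl (fun out j =>
            PySem.Set.add out (undirected_pair_key (ms.getD i "") (ms.getD j ""))) out) out)
        = ((List.range ms.length).flatMap fun k =>
            (ms.drop (k + 1)).map fun b => undirected_pair_key (ms.getD k "") b).foldl
            PySem.Set.add out := by
      by_cases h2 : ms.length < 2
      · rw [if_pos h2]
        rcases ms with _ | ⟨a, _ | ⟨b, t⟩⟩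
        · rfl
        · rfl
        · simp at h2
      · rw [if_neg h2, List.foldl_flatMap]
        refine PySem.List.foldl_congr_mem _ _ _ _ ?_
        intro acc i _
        rw [← pvDrop_map ms "" (i + 1), List.map_map, List.foldl_map]
        rfl
    rw [hone]
    exact ih _

-- ===== VERDICT (by name: the statement is the Claim_ definition above) =====
theorem issue_pairs_cve_or_pkg_spec : Claim_equal_issue_pairs_cve_or_pkg := by
  intro created _
  show issue_pairs_cve_or_pkg created = issue_pairs_cve_or_pkg_alt created
  unfold issue_pairs_cve_or_pkg issue_pairs_cve_or_pkg_alt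
  by_cases h2 : created.length < 2
  · simp only [if_pos h2]
  · simp only [if_neg h2]
    set n := created.length with hn
    -- ===== A side: the nested pair scan is a fold of unions over the edge list pvEA =====
    set pA := List.foldl (fun p i =>
        List.foldl (fun p j => if pvRel created i j = true then pvUnionA p i j else p) p
          (List.range' (i + 1) (n - (i + 1)))) (List.range n) (List.range n) with hpA
    have hAfold : pA = (pvEA created n).foldl (fun p e => pvUnionA p e.1 e.2) (List.range n) := by
      rw [hpA]
      unfold pvEA
      rw [List.foldl_flatMap]
      refine (PySem.List.foldl_congr_mem _ _ _ _ ?_)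
      intro p i _
      rw [List.foldl_map, List.foldl_filter]
    have hboundsA : ∀ e ∈ pvEA created n,
        e.1 < (List.range n).length ∧ e.2 < (List.range n).length := by
      intro e he
      rw [List.length_range]
      have h := (pvMem_EA created n e).mp he
      exact ⟨h.1, h.2.1⟩
    have hbase : ∀ u v, pvSame (List.range n) u v ↔ pvER [] u v :=
      fun u v => (pvRange_same n u v).trans (pvER_nil u v).symm
    obtain ⟨hInvA, hLenA, hSameA⟩ := pvFoldUnion (σ := List Nat) id
      (fun p e => pvUnionA p e.1 e.2) (fun st e hI hx hy => pvUnionA_spec hI hx hy)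
      (pvEA created n) [] (List.range n) (pvRange_inv n) hboundsA hbase
    simp only [id_eq, List.nil_append, List.length_range] at hInvA hLenA hSameA
    rw [← hAfold] at hInvA hLenA hSameA
    -- ===== B side: buckets, their values, and the bucket-edge fold =====
    set vb := List.foldl (fun d i => d.modify (pvItem created i).2.1 [] fun x => x ++ [i])
      PySem.Dict.empty (List.range n) with hvb
    set pb := List.foldl (fun d i =>
        if (!(pvItem created i).2.2 == "") = true then
          d.modify (pvItem created i).2.2 [] fun x => x ++ [i]
        else d) PySem.Dict.empty (List.range n) with hpb
    set pB := List.foldl (fun st idxs => List.foldl pvUnionStepB st (idxs.zip idxs.tail))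
      (List.range n, List.replicate n 1) (vb.values ++ pb.values) with hpB
    have hBfold : pB = ((vb.values ++ pb.values).flatMap
        (fun idxs => idxs.zip idxs.tail)).foldl pvUnionStepB
        (List.range n, List.replicate n 1) := by
      rw [hpB, List.foldl_flatMap]
    have hvbvals : vb.values =
        (PySem.Set.ofList ((List.range n).map (fun i => (pvItem created i).2.1))).map
          (fun c => (List.range n).filter (fun i => (pvItem created i).2.1 == c)) := by
      rw [hvb, pvKeyedValues (List.range n) (fun i => (pvItem created i).2.1) (fun i => i)]
      simp only [List.map_id']
    have hpbvals : pb.values =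
        (PySem.Set.ofList (((List.range n).filter
            (fun i => !((pvItem created i).2.2 == ""))).map (fun i => (pvItem created i).2.2))).map
          (fun c => (((List.range n).filter (fun i => !((pvItem created i).2.2 == ""))).filter
            (fun i => (pvItem created i).2.2 == c))) := by
      rw [hpb, ← List.foldl_filter,
        pvKeyedValues _ (fun i => (pvItem created i).2.2) (fun i => i)]
      simp only [List.map_id']
    have hgood : ∀ idxs ∈ vb.values ++ pb.values, idxs.Pairwise (· < ·) ∧
        (∀ i ∈ idxs, i < n) ∧ (∀ i ∈ idxs, ∀ j ∈ idxs, pvRel created i j = true) := by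
      intro idxs hmem
      have hform : ∃ (q : Nat → Bool), idxs = (List.range n).filter q ∧
          (∀ i j, q i = true → q j = true → pvRel created i j = true) := by
        rcases List.mem_append.mp hmem with h | h
        · rw [hvbvals] at h
          obtain ⟨c, _, rfl⟩ := List.mem_map.mp h
          refine ⟨fun i => (pvItem created i).2.1 == c, rfl, ?_⟩
          intro i j hi hj
          have e1 : (pvItem created i).2.1 = c := by simpa using hi
          have e2 : (pvItem created j).2.1 = c := by simpa using hj
          unfold pvRel
          rw [Bool.or_eq_true]
          left
          simp [e1, e2]
        · rw [hpbvals] at h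
          obtain ⟨c, _, rfl⟩ := List.mem_map.mp h
          refine ⟨fun i => ((pvItem created i).2.2 == c) && !((pvItem created i).2.2 == ""),
            by rw [List.filter_filter], ?_⟩
          intro i j hi hj
          rw [Bool.and_eq_true] at hi hj
          have e1 : (pvItem created i).2.2 = c := by simpa using hi.1
          have e2 : (pvItem created j).2.2 = c := by simpa using hj.1
          unfold pvRel
          rw [Bool.or_eq_true]
          right
          simp only [Bool.and_eq_true]
          refine ⟨⟨hi.2, hj.2⟩, ?_⟩
          simp [e1, e2]
      obtain ⟨q, rfl, hq⟩ := hform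
      refine ⟨List.Pairwise.sublist (List.filter_sublist) List.pairwise_lt_range, ?_, ?_⟩
      · intro i hi
        exact List.mem_range.mp (List.mem_of_mem_filter hi)
      · intro i hi j hj
        exact hq i j (List.of_mem_filter hi) (List.of_mem_filter hj)
    have hcompl : ∀ i j, i < n → j < n → i < j → pvRel created i j = true →
        ∃ idxs ∈ vb.values ++ pb.values, i ∈ idxs ∧ j ∈ idxs := by
      intro i j hi hj _ hrel
      unfold pvRel at hrel
      rw [Bool.or_eq_true] at hrel
      rcases hrel with h | h
      · have e : (pvItem created i).2.1 = (pvItem created j).2.1 := by simpa using h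
        refine ⟨(List.range n).filter (fun i' => (pvItem created i').2.1 == (pvItem created i).2.1),
          ?_, ?_, ?_⟩
        · refine List.mem_append_left _ ?_
          rw [hvbvals]
          refine List.mem_map.mpr ⟨(pvItem created i).2.1, ?_, rfl⟩
          exact (PySem.Set.mem_ofList _ _).mpr (List.mem_map.mpr ⟨i, List.mem_range.mpr hi, rfl⟩)
        · exact List.mem_filter.mpr ⟨List.mem_range.mpr hi, by simp⟩
        · exact List.mem_filter.mpr ⟨List.mem_range.mpr hj, by simp [e]⟩
      · simp only [Bool.and_eq_true] at h
        obtain ⟨⟨ha, hb⟩, hc⟩ := h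
        have e : (pvItem created i).2.2 = (pvItem created j).2.2 := by simpa using hc
        refine ⟨((List.range n).filter (fun i' => !((pvItem created i').2.2 == ""))).filter
            (fun i' => (pvItem created i').2.2 == (pvItem created i).2.2), ?_, ?_, ?_⟩
        · refine List.mem_append_right _ ?_
          rw [hpbvals]
          refine List.mem_map.mpr ⟨(pvItem created i).2.2, ?_, rfl⟩
          refine (PySem.Set.mem_ofList _ _).mpr (List.mem_map.mpr ⟨i, ?_, rfl⟩)
          exact List.mem_filter.mpr ⟨List.mem_range.mpr hi, ha⟩
        · exact List.mem_filter.mpr ⟨List.mem_filter.mpr ⟨List.mem_range.mpr hi, ha⟩,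
            by simp⟩
        · exact List.mem_filter.mpr ⟨List.mem_filter.mpr ⟨List.mem_range.mpr hj, hb⟩,
            by simp [e]⟩
    have hEBbnd : ∀ e ∈ (vb.values ++ pb.values).flatMap (fun idxs => idxs.zip idxs.tail),
        e.1 < (List.range n).length ∧ e.2 < (List.range n).length := by
      intro e he
      rw [List.length_range]
      obtain ⟨idxs, hmem, hz⟩ := List.mem_flatMap.mp he
      obtain ⟨h1, h2'⟩ := pvZipTail_mem hz
      have hb := (hgood idxs hmem).2.1
      exact ⟨hb _ h1, hb _ h2'⟩
    obtain ⟨hInvB, hLenB, hSameB⟩ := pvFoldUnion (σ := List Nat × List Nat) Prod.fst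
      pvUnionStepB (fun st e hI hx hy => pvUnionB_spec st e hI hx hy)
      ((vb.values ++ pb.values).flatMap (fun idxs => idxs.zip idxs.tail)) []
      (List.range n, List.replicate n 1) (pvRange_inv n) hEBbnd hbase
    simp only [List.nil_append, List.length_range] at hInvB hLenB hSameB
    rw [← hBfold] at hInvB hLenB hSameB
    -- ===== comp stage: both grouping dicts have the same values lists =====
    have hcompA := pvCompA_eq created pA hInvA (List.range n) pA PySem.Dict.empty hInvA rfl
      (fun i hi => by rw [hLenA]; exact List.mem_range.mp hi) (fun y r => Iff.rfl)
    rw [hcompA]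
    have hker : ∀ i ∈ List.range n, ∀ j ∈ List.range n,
        (fun i => pvFindB pA.length pA i) i = (fun i => pvFindB pA.length pA i) j ↔
        (fun i => pvFindB pB.1.length pB.1 i) i = (fun i => pvFindB pB.1.length pB.1 i) j := by
      intro i hi j hj
      rw [List.mem_range] at hi hj
      show pvFindB pA.length pA i = pvFindB pA.length pA j ↔
        pvFindB pB.1.length pB.1 i = pvFindB pB.1.length pB.1 j
      rw [pvFindB_ker hInvA (by rw [hLenA]; exact hi) (by rw [hLenA]; exact hj),
        pvFindB_ker hInvB (by rw [hLenB]; exact hi) (by rw [hLenB]; exact hj),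
        hSameA i j, hSameB i j]
      exact pvER_eq created n (vb.values ++ pb.values) hgood hcompl i j
    have hvals := pvKeyedValues_congr (List.range n) (fun i => pvFindB pA.length pA i)
      (fun i => pvFindB pB.1.length pB.1 i) (fun i => (pvItem created i).1) hker
    -- ===== emission =====
    rw [pvEmit_eq, PySem.Set.ofList_eq_foldl, hvals]
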